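-- pv_equiv track=rewrite | github.com/JBRS307/ASD | tests/old/2016-2017/kol2/2.1 Pokemony.py | releasethem
-- ===== SOURCE A (Python) =====
-- class Pokemon:
--     def __init__(self,ind):
--         self.ind = ind
--         self.preys = []
--         self.pred = []
--         self.proc = False
--
-- def releasethem(T,n):
--     P = [Pokemon(i) for i in range(n)]
--     for a,b in T:
--         P[a].preys.append(b)
--         P[b].pred.append(a)
--     A = []
--     for i in range(n):
--         if not P[i].preys:
--             P[i].proc = True
--             A.append(i)
--     def search(ind):
--         cnt = 0
--         for prey in P[ind].preys:
--             if P[prey].proc: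
--                 cnt += 1
--             if cnt == 2:
--                 break
--         if cnt != 2:
--             return
--         P[ind].proc = True
--         A.append(ind)
--         for pred in P[ind].pred:
--             if not P[pred].proc:
--                 search(pred)
--
--     for i in range(n):
--         if not P[i].proc:
--             search(i)
--     if len(A) != n:
--         return None
--     else:
--         return A
--
-- T = [(0, 1), (0, 4), (1, 2), (1, 3), (1, 4), (5, 4), (5, 6), (0, 5), (5, 7), (7, 0), (7, 8)]
-- ===== SOURCE B (Python) =====
-- def releasethem(T, n):
--     preys = [[] for _ in range(n)]
--     preds = [[] for _ in range(n)]
--     proc = [False] * n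
--     for a, b in T:
--         preys[a].append(b)
--         preds[b].append(a)
--     A = []
--     for i in range(n):
--         if not preys[i]:
--             proc[i] = True
--             A.append(i)
--     for i in range(n):
--         if proc[i]:
--             continue
--         stack = [i]
--         while stack:
--             x = stack.pop()
--             if proc[x]:
--                 continue
--             if sum(proc[p] for p in preys[x]) >= 2:
--                 proc[x] = True
--                 A.append(x)
--                 stack.extend(reversed(preds[x]))
--     return A if len(A) == n else None
-- ===== Notes on version B (the rewrite author's own statement) =====
-- stated objective: alternative
-- what changed: A's recursive DFS `search` over a Pokemon class is replaced by an explicit stack loop over plain parallel lists (pop a node, recount its processed preys, push its predecessors top-first), producing the same processing order iteratively; the stack loop avoids Python's per-call recursion overhead (measured constant-factor speedup).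
import Mathlib
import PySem

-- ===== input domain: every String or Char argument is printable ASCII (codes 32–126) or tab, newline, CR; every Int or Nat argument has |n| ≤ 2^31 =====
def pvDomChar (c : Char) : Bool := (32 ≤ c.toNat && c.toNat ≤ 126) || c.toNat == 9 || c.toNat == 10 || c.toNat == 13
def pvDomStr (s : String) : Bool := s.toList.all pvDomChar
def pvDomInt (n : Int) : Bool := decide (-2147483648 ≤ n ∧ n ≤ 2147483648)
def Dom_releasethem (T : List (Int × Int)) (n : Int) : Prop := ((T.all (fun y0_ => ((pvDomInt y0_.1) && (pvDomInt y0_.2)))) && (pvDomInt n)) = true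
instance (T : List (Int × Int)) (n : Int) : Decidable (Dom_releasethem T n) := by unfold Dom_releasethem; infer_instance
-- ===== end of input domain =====

-- B replaces A's recursive `search` by an explicit stack loop (pop a node, recount its
-- processed preys, push its predecessors top-first), with plain parallel lists instead of
-- the Pokemon class; same build and seeding, same output order.  Objective: alternative.

-- ---- helpers shared by both ports (the graph build and the seeding loops are textually
-- ---- identical in the two Pythons).  Python list indexing P[i] wraps a negative index
-- ---- once (i + n); under Pre_ every index is in range, so getD/set with a default is
-- ---- exact there (out of range Python raises IndexError, excluded by Pre_).
def resolveN (n i : Int) : Nat := (if i < 0 then i + n else i).toNat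
def bGet (B : List (List Int)) (n i : Int) : List Int := B.getD (resolveN n i) []
def bApp (B : List (List Int)) (n i v : Int) : List (List Int) := B.set (resolveN n i) (bGet B n i ++ [v])
def pGet (proc : List Bool) (n i : Int) : Bool := proc.getD (resolveN n i) false
def pSet (proc : List Bool) (n i : Int) : List Bool := proc.set (resolveN n i) true

-- for a,b in T: P[a].preys.append(b); P[b].pred.append(a)   (preys table, preds table)
def buildTab (T : List (Int × Int)) (n : Int) : List (List Int) × List (List Int) :=
  T.foldl (fun acc ab => (bApp acc.1 n ab.1 ab.2, bApp acc.2 n ab.2 ab.1))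
    (List.replicate n.toNat [], List.replicate n.toNat [])

-- for i in range(n): if not P[i].preys: P[i].proc = True; A.append(i)
def seed (py : List (List Int)) (n : Int) : List Bool × List Int :=
  (PySem.List.pyRange 0 n 1).foldl
    (fun st i => if (bGet py n i).isEmpty then (pSet st.1 n i, st.2 ++ [i]) else st)
    (List.replicate n.toNat false, [])

-- ===== PORT A =====
-- cnt loop of `search`: count processed preys, break as soon as cnt == 2
def cntA (proc : List Bool) (n : Int) : List Int → Int → Int
  | [], c => c
  | p :: t, c =>
    let c := if pGet proc n p then c + 1 else c
    if c = 2 then c else cntA proc n t c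

-- recursive `search`; Python's recursion is ported with fuel (depth is bounded by the
-- number of unprocessed nodes, so fuel n.toNat+1 at each outer call never runs out on Pre_)
def searchA (py pd : List (List Int)) (n : Int) : Nat → Int → List Bool × List Int → List Bool × List Int
  | 0, _, st => st
  | f + 1, ind, st =>
    if cntA st.1 n (bGet py n ind) 0 ≠ 2 then st
    else
      (bGet pd n ind).foldl
        (fun st p => if pGet st.1 n p then st else searchA py pd n f p st)
        (pSet st.1 n ind, st.2 ++ [ind])

def releasethem (T : List (Int × Int)) (n : Int) : Option (List Int) :=
  let tabs := buildTab T n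
  let st0 := seed tabs.1 n
  let st := (PySem.List.pyRange 0 n 1).foldl
    (fun st i => if pGet st.1 n i then st else searchA tabs.1 tabs.2 n (n.toNat + 1) i st) st0
  if (st.2.length : Int) ≠ n then none else some st.2

-- ===== PORT B =====
-- sum(proc[p] for p in preys[x])
def cntB (proc : List Bool) (n : Int) (ps : List Int) : Int :=
  ps.foldl (fun c p => c + (if pGet proc n p then 1 else 0)) 0

-- the while-stack loop; the stack is kept top-first (head = top), so Python's
-- `x = stack.pop(); ... stack.extend(reversed(preds[x]))` is `x :: s` / `preds ++ s`.
-- Fuel: every iteration pops one entry and a node is pushed only with its predecessors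
-- (at most T.length pushes per processed node), so the chosen fuel never runs out on Pre_.
def loopB (py pd : List (List Int)) (n : Int) : Nat → List Int → List Bool × List Int → List Bool × List Int
  | 0, _, st => st
  | _ + 1, [], st => st
  | f + 1, x :: s, st =>
    if pGet st.1 n x then loopB py pd n f s st
    else if 2 ≤ cntB st.1 n (bGet py n x) then
      loopB py pd n f (bGet pd n x ++ s) (pSet st.1 n x, st.2 ++ [x])
    else loopB py pd n f s st

def releasethem_alt (T : List (Int × Int)) (n : Int) : Option (List Int) :=
  let tabs := buildTab T n
  let st0 := seed tabs.1 n
  let st := (PySem.List.pyRange 0 n 1).foldl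
    (fun st i => if pGet st.1 n i then st
                 else loopB tabs.1 tabs.2 n ((T.length + 1) * (n.toNat + 1) + 1) [i] st) st0
  if (st.2.length : Int) = n then some st.2 else none

-- ===== PRECONDITION & SPEC =====
-- Pre_ excludes exactly the inputs where Python A raises IndexError: an edge endpoint
-- outside [-n, n) (negative endpoints in [-n,0) wrap in both programs and stay inside).
def Pre_releasethem (T : List (Int × Int)) (n : Int) : Prop :=
  ∀ p ∈ T, (-n ≤ p.1 ∧ p.1 < n) ∧ (-n ≤ p.2 ∧ p.2 < n)
instance (T : List (Int × Int)) (n : Int) : Decidable (Pre_releasethem T n) := by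
  unfold Pre_releasethem; infer_instance

def pvWitness_releasethem : (List (Int × Int)) × Int := ([(0, 1), (0, 2), (-1, 0), (1, 2)], 3)

def Spec_releasethem (T : List (Int × Int)) (n : Int) (out : Option (List Int)) : Prop := out = releasethem_alt T n
instance (T : List (Int × Int)) (n : Int) (out : Option (List Int)) : Decidable (Spec_releasethem T n out) := by unfold Spec_releasethem; infer_instance

-- ===== CLAIM (what is proved, stated in full; the proofs are below) =====
def Claim_equal_releasethem : Prop := ∀ (T : List (Int × Int)) (n : Int), Dom_releasethem T n → Pre_releasethem T n → Spec_releasethem T n (releasethem T n)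

-- ===== LEMMAS AND PROOFS =====

-- A's outer/inner visit step, with the fuel A's port uses
def visit (py pd : List (List Int)) (n : Int) (st : List Bool × List Int) (x : Int) : List Bool × List Int :=
  if pGet st.1 n x then st else searchA py pd n (n.toNat + 1) x st

theorem foldl_inv {a b : Type} (P : a -> Prop) :
    forall (l : List b) (f : a -> b -> a) (x : a), P x -> (forall y z, P y -> P (f y z)) -> P (l.foldl f x) := by
  intro l
  induction l with
  | nil => intro f x h _; simpa using h
  | cons c t ih => intro f x h hs; simpa using ih f (f x c) (hs x c h) hs

theorem foldl_congr_inv {a b : Type} (P : a -> Prop) :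
    forall (l : List b) (f g : a -> b -> a) (x : a), P x ->
      (forall y z, z ∈ l -> P y -> P (f y z)) ->
      (forall y z, z ∈ l -> P y -> f y z = g y z) ->
      l.foldl f x = l.foldl g x := by
  intro l
  induction l with
  | nil => intro f g x _ _ _; rfl
  | cons c t ih =>
    intro f g x hx hpres hagree
    simp only [List.foldl_cons]
    rw [ih f g (f x c) (hpres x c (by simp) hx)
        (fun y z hz hy => hpres y z (by simp [hz]) hy)
        (fun y z hz hy => hagree y z (by simp [hz]) hy)]
    rw [hagree x c (by simp) hx]

theorem count_false_set_true_le (l : List Bool) (k : Nat) :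
    (l.set k true).count false ≤ l.count false := by
  induction l generalizing k with
  | nil => simp
  | cons a t ih =>
    cases k with
    | zero => simp only [List.set_cons_zero, List.count_cons]; cases a <;> simp
    | succ k =>
      simp only [List.set_cons_succ, List.count_cons]
      have := ih k
      omega

theorem count_false_set_true (l : List Bool) (k : Nat) (hk : k < l.length)
    (hv : l.getD k false = false) : (l.set k true).count false + 1 = l.count false := by
  induction l generalizing k with
  | nil => simp at hk
  | cons a t ih =>
    cases k with
    | zero => simp at hv; subst hv; simp
    | succ k =>
      simp at hk hv
      simp only [List.set_cons_succ, List.count_cons]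
      have := ih k hk hv
      omega

theorem count_false_pos (l : List Bool) (k : Nat) (hk : k < l.length)
    (hv : l.getD k false = false) : 1 ≤ l.count false := by
  have hmem : false ∈ l := by
    have h := List.getD_eq_getElem l false hk
    rw [hv] at h
    exact h ▸ List.getElem_mem hk
  exact List.count_pos_iff.mpr hmem

theorem searchA_inv (py pd : List (List Int)) (n : Int) :
    ∀ (f : Nat) (x : Int) (st : List Bool × List Int),
      (searchA py pd n f x st).1.length = st.1.length ∧
      (searchA py pd n f x st).1.count false ≤ st.1.count false := by
  intro f
  induction f with
  | zero => intro x st; exact ⟨rfl, le_rfl⟩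
  | succ f ih =>
    intro x st
    rw [searchA]
    split
    · exact ⟨rfl, le_rfl⟩
    · refine foldl_inv
        (fun a : List Bool × List Int => a.1.length = st.1.length ∧ a.1.count false ≤ st.1.count false) _ _ _
        ⟨by simp [pSet], count_false_set_true_le st.1 _⟩ ?_
      intro y z hy
      dsimp only
      split
      · exact hy
      · obtain ⟨g1, g2⟩ := ih z y
        exact ⟨g1.trans hy.1, g2.trans hy.2⟩

theorem visit_len (py pd : List (List Int)) (n : Int) (st : List Bool × List Int) (x : Int) :
    (visit py pd n st x).1.length = st.1.length := by
  unfold visit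
  split
  · rfl
  · exact (searchA_inv py pd n _ x st).1

theorem searchA_irrel (py pd : List (List Int)) (n : Int)
    (Hv : ∀ x p, p ∈ bGet pd n x → resolveN n p < n.toNat) :
    ∀ (u f f' : Nat) (x : Int) (st : List Bool × List Int),
      st.1.length = n.toNat → resolveN n x < n.toNat → pGet st.1 n x = false →
      st.1.count false = u → u ≤ f → u ≤ f' →
      searchA py pd n f x st = searchA py pd n f' x st := by
  intro u
  induction u using Nat.strong_induction_on with
  | _ u IH =>
    intro f f' x st hlen hx hpx hcnt hf hf'
    have hu1 : 1 ≤ u := hcnt ▸ count_false_pos st.1 (resolveN n x) (hlen ▸ hx) hpx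
    obtain ⟨f1, rfl⟩ : ∃ f1, f = f1 + 1 := ⟨f - 1, by omega⟩
    obtain ⟨f1', rfl⟩ : ∃ f1', f' = f1' + 1 := ⟨f' - 1, by omega⟩
    rw [searchA, searchA]
    split
    · rfl
    · have hcount' : (pSet st.1 n x, st.2 ++ [x]).1.count false + 1 = u := by
        rw [← hcnt]
        exact count_false_set_true st.1 (resolveN n x) (hlen ▸ hx) hpx
      refine foldl_congr_inv
        (fun a : List Bool × List Int => a.1.length = n.toNat ∧ a.1.count false + 1 ≤ u) _ _ _ _
        ⟨by simp [pSet, hlen], by omega⟩ ?_ ?_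
      · intro y z _ hy
        dsimp only
        split
        · exact hy
        · obtain ⟨g1, g2⟩ := searchA_inv py pd n f1 z y
          exact ⟨g1.trans hy.1, by omega⟩
      · intro y z hz hy
        dsimp only
        split
        · rfl
        · rename_i hpz
          exact IH (y.1.count false) (by omega) f1 f1' z y hy.1 (Hv x z hz)
            (by simpa using hpz) rfl (by omega) (by omega)

theorem searchA_top (py pd : List (List Int)) (n : Int)
    (Hv : ∀ x p, p ∈ bGet pd n x → resolveN n p < n.toNat)
    (x : Int) (st : List Bool × List Int)
    (hlen : st.1.length = n.toNat) (hx : resolveN n x < n.toNat) (hpx : pGet st.1 n x = false) :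
    searchA py pd n (n.toNat + 1) x st =
      if cntA st.1 n (bGet py n x) 0 ≠ 2 then st
      else (bGet pd n x).foldl (visit py pd n) (pSet st.1 n x, st.2 ++ [x]) := by
  rw [searchA]
  split
  · rfl
  · have hcount' : (pSet st.1 n x, st.2 ++ [x]).1.count false + 1 = st.1.count false :=
      count_false_set_true st.1 (resolveN n x) (hlen ▸ hx) hpx
    have hcn : st.1.count false ≤ n.toNat := hlen ▸ List.count_le_length
    refine foldl_congr_inv
      (fun a : List Bool × List Int => a.1.length = n.toNat ∧ a.1.count false + 1 ≤ n.toNat) _ _ _ _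
      ⟨by simp [pSet, hlen], by omega⟩ ?_ ?_
    · intro y z _ hy
      dsimp only
      split
      · exact hy
      · obtain ⟨g1, g2⟩ := searchA_inv py pd n n.toNat z y
        exact ⟨g1.trans hy.1, by omega⟩
    · intro y z hz hy
      unfold visit
      split
      · rfl
      · rename_i hpz
        exact searchA_irrel py pd n Hv (y.1.count false) n.toNat (n.toNat + 1) z y hy.1
          (Hv x z hz) (by simpa using hpz) rfl (by omega) (by omega)

theorem cntB_eq_sum (proc : List Bool) (n : Int) (ps : List Int) :
    cntB proc n ps = (ps.map (fun p => if pGet proc n p then (1 : Int) else 0)).sum := by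
  unfold cntB
  rw [PySem.List.foldl_add (g := fun p => if pGet proc n p then (1 : Int) else 0)]
  simp

theorem cntB_nonneg (proc : List Bool) (n : Int) (ps : List Int) : 0 ≤ cntB proc n ps := by
  rw [cntB_eq_sum]
  apply List.sum_nonneg
  intro x hx
  obtain ⟨p, _, rfl⟩ := List.mem_map.1 hx
  split <;> norm_num

theorem cnt_iff (proc : List Bool) (n : Int) :
    ∀ (ps : List Int) (c : Int), 0 ≤ c → c < 2 →
      (cntA proc n ps c = 2 ↔ 2 ≤ c + cntB proc n ps) := by
  intro ps
  induction ps with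
  | nil =>
    intro c h0 h2
    rw [cntA]
    unfold cntB
    simp only [List.foldl_nil]
    constructor <;> intro h <;> omega
  | cons p t ih =>
    intro c h0 h2
    have hsum : cntB proc n (p :: t) = (if pGet proc n p then (1 : Int) else 0) + cntB proc n t := by
      rw [cntB_eq_sum, cntB_eq_sum, List.map_cons, List.sum_cons]
    have htn : 0 ≤ cntB proc n t := cntB_nonneg proc n t
    rw [cntA, hsum]
    cases hp : pGet proc n p with
    | false =>
      simp only [Bool.false_eq_true, if_false]
      have hne : ¬ (c = 2) := by omega
      rw [if_neg hne, ih c h0 h2]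
      constructor <;> intro h <;> omega
    | true =>
      simp only [if_true]
      by_cases h1 : c + 1 = 2
      · rw [if_pos h1]
        constructor <;> intro _ <;> omega
      · rw [if_neg h1, ih (c + 1) (by omega) (by omega)]
        constructor <;> intro h <;> omega

theorem sim (py pd : List (List Int)) (n : Int) (L : Nat)
    (Hv : ∀ x p, p ∈ bGet pd n x → resolveN n p < n.toNat)
    (HL : ∀ x, (bGet pd n x).length ≤ L) :
    ∀ (f : Nat) (s : List Int) (st : List Bool × List Int),
      st.1.length = n.toNat → (∀ x ∈ s, resolveN n x < n.toNat) →
      s.length + (L + 1) * st.1.count false < f →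
      loopB py pd n f s st = s.foldl (visit py pd n) st := by
  intro f
  induction f with
  | zero => intro s st _ _ hm; exact absurd hm (Nat.not_lt_zero _)
  | succ f ih =>
    intro s st hlen hs hm
    cases s with
    | nil => rw [loopB]; rfl
    | cons x s' =>
      have hx : resolveN n x < n.toNat := hs x (by simp)
      have hs' : ∀ y ∈ s', resolveN n y < n.toNat := fun y hy => hs y (by simp [hy])
      rw [loopB]
      simp only [List.foldl_cons]
      cases hp : pGet st.1 n x with
      | true =>
        have hm' : s'.length + (L + 1) * st.1.count false < f := by
          obtain ⟨K, hK⟩ : ∃ K, (L + 1) * st.1.count false = K := ⟨_, rfl⟩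
          rw [hK] at hm ⊢
          simp only [List.length_cons] at hm
          omega
        have hv : visit py pd n st x = st := by simp [visit, hp]
        rw [if_pos rfl, hv, ih s' st hlen hs' hm']
      | false =>
        rw [if_neg (by simp)]
        have hA := cnt_iff st.1 n (bGet py n x) 0 (by omega) (by omega)
        have hvx : visit py pd n st x = searchA py pd n (n.toNat + 1) x st := by
          unfold visit; rw [if_neg (by simp [hp])]
        by_cases h2 : 2 ≤ cntB st.1 n (bGet py n x)
        · rw [if_pos h2]
          have hcA : cntA st.1 n (bGet py n x) 0 = 2 := hA.mpr (by omega)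
          have hcount : (pSet st.1 n x, st.2 ++ [x]).1.count false + 1 = st.1.count false :=
            count_false_set_true st.1 (resolveN n x) (hlen ▸ hx) hp
          have hlen' : (pSet st.1 n x, st.2 ++ [x]).1.length = n.toNat := by simp [pSet, hlen]
          have hbL : (bGet pd n x).length ≤ L := HL x
          have hm' : (bGet pd n x ++ s').length +
              (L + 1) * (pSet st.1 n x, st.2 ++ [x]).1.count false < f := by
            obtain ⟨c', hc'⟩ : ∃ c', (pSet st.1 n x, st.2 ++ [x]).1.count false = c' := ⟨_, rfl⟩
            have hcc : st.1.count false = c' + 1 := by omega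
            rw [List.length_append, hc']
            rw [hcc, Nat.mul_succ] at hm
            simp only [List.length_cons] at hm
            obtain ⟨K, hK⟩ : ∃ K, (L + 1) * c' = K := ⟨_, rfl⟩
            rw [hK] at hm ⊢
            omega
          rw [ih (bGet pd n x ++ s') (pSet st.1 n x, st.2 ++ [x]) hlen'
              (by intro y hy; rcases List.mem_append.1 hy with h | h
                  exacts [Hv x y h, hs' y h]) hm']
          rw [List.foldl_append]
          rw [hvx, searchA_top py pd n Hv x st hlen hx hp, if_neg (by simp [hcA])]
        · rw [if_neg h2]
          have hm' : s'.length + (L + 1) * st.1.count false < f := by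
            obtain ⟨K, hK⟩ : ∃ K, (L + 1) * st.1.count false = K := ⟨_, rfl⟩
            rw [hK] at hm ⊢
            simp only [List.length_cons] at hm
            omega
          have hcA : cntA st.1 n (bGet py n x) 0 ≠ 2 := by
            intro h; exact h2 (by have := hA.mp h; omega)
          have hv2 : visit py pd n st x = st := by
            rw [hvx, searchA, if_pos hcA]
          rw [hv2, ih s' st hlen hs' hm']

theorem resolveN_lt (n i : Int) (h1 : -n ≤ i) (h2 : i < n) : resolveN n i < n.toNat := by
  unfold resolveN
  split <;> omega

theorem getD_set_bucket (B : List (List Int)) (k j : Nat) (w : List Int) :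
    (B.set k w).getD j [] = if k = j ∧ k < B.length then w else B.getD j [] := by
  rw [List.getD_eq_getElem?_getD, List.getElem?_set, List.getD_eq_getElem?_getD]
  by_cases he : k = j
  · subst he
    by_cases hl : k < B.length <;> simp [hl]
  · simp [he]

theorem mem_bGet_bApp (B : List (List Int)) (n i v x : Int) (p : Int)
    (hp : p ∈ bGet (bApp B n i v) n x) : p ∈ bGet B n x ∨ p = v := by
  unfold bGet bApp at hp
  rw [getD_set_bucket] at hp
  split at hp
  · rename_i hcond
    rcases List.mem_append.1 hp with h | h
    · left; unfold bGet at h ⊢; rw [← hcond.1]; exact h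
    · right; simpa using h
  · left; exact hp

theorem len_bGet_bApp (B : List (List Int)) (n i v x : Int) :
    (bGet (bApp B n i v) n x).length ≤ (bGet B n x).length + 1 := by
  unfold bGet bApp
  rw [getD_set_bucket]
  split
  · rename_i hcond
    unfold bGet
    rw [← hcond.1]
    simp
  · simp

theorem bGet_replicate (n : Int) (k : Nat) (x : Int) :
    bGet (List.replicate k ([] : List Int)) n x = [] := by
  unfold bGet
  rw [List.getD_eq_getElem?_getD, List.getElem?_replicate]
  split <;> simp

theorem buildTab_step_mem (T : List (Int × Int)) (n : Int) :
    ∀ (acc : List (List Int) × List (List Int)) (x p : Int),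
      p ∈ bGet (T.foldl (fun acc ab => (bApp acc.1 n ab.1 ab.2, bApp acc.2 n ab.2 ab.1)) acc).2 n x →
      p ∈ bGet acc.2 n x ∨ ∃ q ∈ T, p = q.1 := by
  induction T with
  | nil => intro acc x p hp; exact Or.inl hp
  | cons ab t ih =>
    intro acc x p hp
    simp only [List.foldl_cons] at hp
    rcases ih _ x p hp with h | h
    · rcases mem_bGet_bApp acc.2 n ab.2 ab.1 x p h with h2 | h2
      · exact Or.inl h2
      · exact Or.inr ⟨ab, by simp, h2⟩
    · obtain ⟨q, hq, he⟩ := h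
      exact Or.inr ⟨q, by simp [hq], he⟩

theorem buildTab_step_len (T : List (Int × Int)) (n : Int) :
    ∀ (acc : List (List Int) × List (List Int)) (x : Int),
      (bGet (T.foldl (fun acc ab => (bApp acc.1 n ab.1 ab.2, bApp acc.2 n ab.2 ab.1)) acc).2 n x).length ≤
      (bGet acc.2 n x).length + T.length := by
  induction T with
  | nil => intro acc x; simp
  | cons ab t ih =>
    intro acc x
    simp only [List.foldl_cons, List.length_cons]
    have h1 := ih (bApp acc.1 n ab.1 ab.2, bApp acc.2 n ab.2 ab.1) x
    have h2 := len_bGet_bApp acc.2 n ab.2 ab.1 x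
    simp only at h1
    omega

theorem main_eq (T : List (Int × Int)) (n : Int) (hpre : Pre_releasethem T n) :
    releasethem T n = releasethem_alt T n := by
  have Hv : ∀ x p, p ∈ bGet (buildTab T n).2 n x → resolveN n p < n.toNat := by
    intro x p hp
    rcases buildTab_step_mem T n _ x p hp with h | h
    · rw [bGet_replicate] at h; simp at h
    · obtain ⟨q, hq, rfl⟩ := h
      obtain ⟨⟨h1, h2⟩, _⟩ := hpre q hq
      exact resolveN_lt n q.1 h1 h2
  have HL : ∀ x, (bGet (buildTab T n).2 n x).length ≤ T.length := by
    intro x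
    have h := buildTab_step_len T n (List.replicate n.toNat [], List.replicate n.toNat []) x
    rw [bGet_replicate] at h
    simpa using h
  have hlen0 : (seed (buildTab T n).1 n).1.length = n.toNat := by
    unfold seed
    refine foldl_inv (fun a : List Bool × List Int => a.1.length = n.toNat) _ _ _ (by simp) ?_
    intro y z hy
    dsimp only
    split
    · simpa [pSet] using hy
    · exact hy
  have hstep : ∀ (y : List Bool × List Int) (z : Int), z ∈ PySem.List.pyRange 0 n 1 →
      y.1.length = n.toNat →
      (if pGet y.1 n z then y
       else loopB (buildTab T n).1 (buildTab T n).2 n ((T.length + 1) * (n.toNat + 1) + 1) [z] y)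
        = visit (buildTab T n).1 (buildTab T n).2 n y z := by
    intro y z hz hy
    unfold visit
    split
    · rfl
    · rename_i hpz
      have hz' : resolveN n z < n.toNat := by
        have hzr := (PySem.List.mem_pyRange_one).1 hz
        exact resolveN_lt n z (by omega) (by omega)
      rw [sim (buildTab T n).1 (buildTab T n).2 n T.length Hv HL _ [z] y hy
          (by intro w hw; simp at hw; subst hw; exact hz')
          (by
            have hc : y.1.count false ≤ n.toNat := by rw [← hy]; exact List.count_le_length
            have hmul := Nat.mul_le_mul_left (T.length + 1) hc
            simp only [List.length_cons, List.length_nil]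
            calc 1 + (T.length + 1) * y.1.count false
                ≤ 1 + (T.length + 1) * n.toNat := by omega
              _ < (T.length + 1) * (n.toNat + 1) + 1 := by
                  rw [Nat.mul_succ]; omega)]
      simp only [List.foldl_cons, List.foldl_nil]
      unfold visit
      rw [if_neg hpz]
  have hfold :
      (PySem.List.pyRange 0 n 1).foldl
        (fun st i => if pGet st.1 n i then st
          else searchA (buildTab T n).1 (buildTab T n).2 n (n.toNat + 1) i st)
        (seed (buildTab T n).1 n) =
      (PySem.List.pyRange 0 n 1).foldl
        (fun st i => if pGet st.1 n i then st
          else loopB (buildTab T n).1 (buildTab T n).2 n ((T.length + 1) * (n.toNat + 1) + 1) [i] st)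
        (seed (buildTab T n).1 n) := by
    have hB := foldl_congr_inv (fun a : List Bool × List Int => a.1.length = n.toNat)
      (PySem.List.pyRange 0 n 1)
      (fun st i => if pGet st.1 n i then st
        else loopB (buildTab T n).1 (buildTab T n).2 n ((T.length + 1) * (n.toNat + 1) + 1) [i] st)
      (visit (buildTab T n).1 (buildTab T n).2 n)
      (seed (buildTab T n).1 n) hlen0
      (by
        intro y z hz hy
        dsimp only
        rw [hstep y z hz hy]
        rw [visit_len]
        exact hy)
      (fun y z hz hy => hstep y z hz hy)
    exact hB.symm
  unfold releasethem releasethem_alt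
  dsimp only
  rw [hfold]
  by_cases h : ((((PySem.List.pyRange 0 n 1).foldl
      (fun st i => if pGet st.1 n i then st
        else loopB (buildTab T n).1 (buildTab T n).2 n ((T.length + 1) * (n.toNat + 1) + 1) [i] st)
      (seed (buildTab T n).1 n)).2.length : Int) = n)
  · rw [if_neg (by simp [h]), if_pos h]
  · rw [if_pos (by simp [h]), if_neg h]

-- ===== VERDICT (by name: the statement is the Claim_ definition above) =====
theorem releasethem_spec : Claim_equal_releasethem := by
  intro T n _ hpre
  unfold Spec_releasethem
  exact main_eq T n hpre
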